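-- pv_equiv track=rewrite | github.com/jowxn/stock-chatbot | streamlit-app/app.py | extract_stock_symbol
-- ===== SOURCE A (Python) =====
-- def extract_stock_symbol(query: str):
--     """Better stock symbol extraction"""
--     query_upper = query.upper()
--     words = query_upper.split()
--
--     # Common Indian stock symbols
--     known_stocks = ['RELIANCE', 'TCS', 'INFY', 'HDFCBANK', 'ICICIBANK', 'SBIN', 'ITC', 'LT', 'WIPRO', 'MARUTI']
--
--     # First check for known stocks
--     for word in words:
--         if word in known_stocks:
--             return word
--
--     # Then check for potential symbols (3+ chars, all alpha)
--     for word in words: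
--         if len(word) >= 3 and word.isalpha():
--             return word
--
--     return None
-- ===== SOURCE B (Python) =====
-- def extract_stock_symbol(query: str):
--     """Better stock symbol extraction (single-pass)."""
--     known_stocks = {'RELIANCE', 'TCS', 'INFY', 'HDFCBANK', 'ICICIBANK',
--                     'SBIN', 'ITC', 'LT', 'WIPRO', 'MARUTI'}
--     candidate = None
--     for word in query.upper().split():
--         if word in known_stocks:
--             return word
--         if candidate is None and len(word) >= 3 and word.isalpha():
--             candidate = word
--     return candidate
-- ===== Notes on version B (the rewrite author's own statement) =====
-- stated objective: simpler
-- what changed: Merged A's two sequential scans over the word list into one stateful pass that returns a known symbol immediately and records the first 3+-letter alphabetic word as a fallback returned after the loop.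
import Mathlib
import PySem

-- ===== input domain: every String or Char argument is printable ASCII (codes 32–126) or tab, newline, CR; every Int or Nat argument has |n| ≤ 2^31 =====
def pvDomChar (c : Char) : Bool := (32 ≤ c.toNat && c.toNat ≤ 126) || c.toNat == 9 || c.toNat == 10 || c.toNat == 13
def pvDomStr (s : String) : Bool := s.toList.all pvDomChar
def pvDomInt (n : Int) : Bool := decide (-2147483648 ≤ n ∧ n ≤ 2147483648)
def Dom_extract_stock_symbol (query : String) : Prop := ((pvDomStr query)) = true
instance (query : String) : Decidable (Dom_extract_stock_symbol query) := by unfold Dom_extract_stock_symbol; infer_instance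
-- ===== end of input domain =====

-- B merges A's two sequential scans into one stateful pass (simpler decomposition; same cost).

-- ===== PORT A =====
def pvKnownStocks : List String :=
  ["RELIANCE", "TCS", "INFY", "HDFCBANK", "ICICIBANK", "SBIN", "ITC", "LT", "WIPRO", "MARUTI"]

-- first loop: first word that is in known_stocks
def pvLoopKnown : List String → Option String
  | [] => none
  | w :: ws => if pvKnownStocks.contains w then some w else pvLoopKnown ws

-- second loop: first word with len >= 3 and isalpha()
def pvLoopAlpha : List String → Option String
  | [] => none
  | w :: ws =>
      if 3 ≤ PySem.Str.len w ∧ PySem.Str.strIsalpha w = true then some w else pvLoopAlpha ws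

def extract_stock_symbol (query : String) : Option String :=
  let words := PySem.Str.split₀ (PySem.Str.upper query)
  match pvLoopKnown words with
  | some w => some w
  | none =>
    match pvLoopAlpha words with
    | some w => some w
    | none => none

-- ===== PORT B =====
def pvKnownSet : PySem.Set String :=
  PySem.Set.ofList
    ["RELIANCE", "TCS", "INFY", "HDFCBANK", "ICICIBANK", "SBIN", "ITC", "LT", "WIPRO", "MARUTI"]

-- single pass: return a known word at once, else record the first alpha candidate
def pvScan : List String → Option String → Option String
  | [], cand => cand
  | w :: ws, cand =>
      if PySem.Set.contains pvKnownSet w then some w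
      else pvScan ws
        (if cand = none ∧ 3 ≤ PySem.Str.len w ∧ PySem.Str.strIsalpha w = true then some w else cand)

def extract_stock_symbol_alt (query : String) : Option String :=
  pvScan (PySem.Str.split₀ (PySem.Str.upper query)) none

-- ===== PRECONDITION & SPEC =====
def Spec_extract_stock_symbol (query : String) (out : Option String) : Prop := out = extract_stock_symbol_alt query
instance (query : String) (out : Option String) : Decidable (Spec_extract_stock_symbol query out) := by unfold Spec_extract_stock_symbol; infer_instance

-- ===== CLAIM (what is proved, stated in full; the proofs are below) =====
def Claim_equal_extract_stock_symbol : Prop := ∀ (query : String), Dom_extract_stock_symbol query → Spec_extract_stock_symbol query (extract_stock_symbol query)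

-- ===== LEMMAS AND PROOFS =====

lemma pvContains_iff (w : String) :
    PySem.Set.contains pvKnownSet w = pvKnownStocks.contains w := by
  simp [pvKnownSet, pvKnownStocks, PySem.Set.contains, PySem.Set.ofList]

lemma pvScan_eq (ws : List String) (cand : Option String) :
    pvScan ws cand =
      match pvLoopKnown ws with
      | some w => some w
      | none =>
        match cand with
        | some c => some c
        | none => pvLoopAlpha ws := by
  induction ws generalizing cand with
  | nil => cases cand <;> simp [pvScan, pvLoopKnown, pvLoopAlpha]
  | cons w ws ih =>
    simp only [pvScan, pvLoopKnown, pvLoopAlpha, pvContains_iff]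
    by_cases hk : w ∈ pvKnownStocks
    · simp [hk]
    · simp only [List.contains_eq_mem, hk, decide_false, Bool.false_eq_true, if_false]
      rw [ih]
      cases pvLoopKnown ws <;> cases cand <;> (try rfl)
      by_cases hx : 3 ≤ PySem.Str.len w ∧ PySem.Str.strIsalpha w = true
      · rw [if_pos ⟨rfl, hx⟩, if_pos hx]
      · rw [if_neg (fun h => hx h.2), if_neg hx]

-- ===== VERDICT (by name: the statement is the Claim_ definition above) =====
theorem extract_stock_symbol_spec : Claim_equal_extract_stock_symbol := by
  intro query _
  show extract_stock_symbol query = extract_stock_symbol_alt query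
  simp only [extract_stock_symbol, extract_stock_symbol_alt]
  rw [pvScan_eq]
  cases pvLoopKnown (PySem.Str.split₀ (PySem.Str.upper query)) with
  | some w => rfl
  | none => cases pvLoopAlpha (PySem.Str.split₀ (PySem.Str.upper query)) <;> rfl
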